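-- pv_equiv track=rewrite | github.com/ItzYakutia/pp2 | pp/test.py | smallest_possible_sum
-- ===== SOURCE A (Python) =====
-- def smallest_possible_sum(X):
--     while True:
--         # Sort the array in non-decreasing order
--         X.sort()
--
--         # Check if any transformations are possible
--         transformations_possible = False
--
--         for i in range(1, len(X)):
--             if X[i] > 0 and X[i] > X[i - 1]:
--                 X[i] -= X[i - 1]
--                 transformations_possible = True
--
--         # If no more transformations are possible, break the loop
--         if not transformations_possible:
--             break
--
--     return sum(X)
-- ===== SOURCE B (Python) =====
-- def smallest_possible_sum(X):
--     # Repeated "subtract the smaller from the larger" reduces every element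
--     # to the gcd; so for an all-positive list the answer is len(X) * gcd(X).
--     # Otherwise (no positive element) no transformation ever fires and the
--     # answer is just sum(X).
--     if not all(x > 0 for x in X):
--         return sum(X)
--     g = 0
--     for x in X:
--         while x > 0:
--             g, x = x, g % x
--     return len(X) * g
-- ===== Notes on version B (the rewrite author's own statement) =====
-- stated objective: faster
-- what changed: Replaces the repeated sort-and-subtract fixpoint loop by a single Euclid-gcd pass: for all-positive input the answer is len(X)*gcd(X), otherwise sum(X).
import Mathlib
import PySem

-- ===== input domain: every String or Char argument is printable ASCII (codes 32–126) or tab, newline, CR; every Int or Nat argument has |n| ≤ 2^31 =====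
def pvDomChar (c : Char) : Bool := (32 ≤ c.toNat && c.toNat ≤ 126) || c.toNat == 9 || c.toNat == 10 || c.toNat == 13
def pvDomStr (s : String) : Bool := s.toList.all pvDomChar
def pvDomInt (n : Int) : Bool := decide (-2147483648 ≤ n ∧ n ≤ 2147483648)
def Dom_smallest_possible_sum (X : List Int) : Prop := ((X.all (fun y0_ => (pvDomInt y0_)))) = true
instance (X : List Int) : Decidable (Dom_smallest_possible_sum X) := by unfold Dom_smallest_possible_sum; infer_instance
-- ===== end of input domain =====

-- B replaces A's repeated sort-and-subtract fixpoint loop by one Euclid-gcd pass (faster).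
-- Python A mutates its argument in place (sorts and rewrites it); the equivalence here is about the RETURN value only.

-- ===== PORT A =====
-- the body of `for i in range(1, len(X))`: walks the list left to right carrying the
-- current value of X[i-1]; updates X[i] in place and the transformations flag.
def passA (prev : Int) : List Int → List Int × Bool
  | [] => ([], false)
  | x :: rest =>
      if x > 0 ∧ x > prev then
        let r := passA (x - prev) rest
        ((x - prev) :: r.1, true)
      else
        let r := passA x rest
        (x :: r.1, r.2)

-- one execution of the for loop (indices 1..len-1; X[0] is only ever read)
def onePass : List Int → List Int × Bool
  | [] => ([], false)
  | x :: rest =>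
      let r := passA x rest
      (x :: r.1, r.2)

-- the `while True` loop; each flagged iteration strictly decreases the (nonnegative,
-- on Pre_) sum, so fuel `sum.toNat + 1` is never exhausted on Pre_ (proved below).
def loopA : Nat → List Int → Int
  | 0, X => X.sum
  | fuel + 1, X =>
      let Xs := PySem.List.sorted X (fun x => x) false
      let r := onePass Xs
      if r.2 then loopA fuel r.1 else r.1.sum

def smallest_possible_sum (X : List Int) : Int := loopA (X.sum.toNat + 1) X

-- ===== PORT B =====
-- the inner `while x > 0: g, x = x, g % x`
def euclid (g x : Int) : Int :=
  if h : 0 < x then euclid x (PySem.Int.mod g x) else g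
termination_by x.toNat
decreasing_by
  have h2 := PySem.Int.mod_lt g h
  omega

def smallest_possible_sum_alt (X : List Int) : Int :=
  if ¬ (X.all (fun x => decide (x > 0))) then X.sum
  else (X.length : Int) * X.foldl euclid 0

-- ===== PRECONDITION & SPEC =====
-- Pre_ excludes lists containing both a positive and a non-positive element: on those A's
-- `while True` loop never terminates (e.g. on [0, 1] the pass flags forever), so A returns no value there.
def Pre_smallest_possible_sum (X : List Int) : Prop :=
  (X.all (fun x => decide (0 < x)) = true) ∨ (X.all (fun x => decide (x ≤ 0)) = true)
instance (X : List Int) : Decidable (Pre_smallest_possible_sum X) := by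
  unfold Pre_smallest_possible_sum; infer_instance

def pvWitness_smallest_possible_sum : List Int := [6, 4, 10]

def Spec_smallest_possible_sum (X : List Int) (out : Int) : Prop := out = smallest_possible_sum_alt X
instance (X : List Int) (out : Int) : Decidable (Spec_smallest_possible_sum X out) := by unfold Spec_smallest_possible_sum; infer_instance

-- ===== CLAIM (what is proved, stated in full; the proofs are below) =====
def Claim_equal_smallest_possible_sum : Prop := ∀ (X : List Int), Dom_smallest_possible_sum X → Pre_smallest_possible_sum X → Spec_smallest_possible_sum X (smallest_possible_sum X)

-- ===== LEMMAS AND PROOFS =====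

-- gcd-fold over a list of ints (proof-only helper)
def foldG (a : Nat) (L : List Int) : Nat := L.foldl (fun g x => Nat.gcd g x.natAbs) a

theorem natAbs_dvd_iff' (k : Nat) (x : Int) : k ∣ x.natAbs ↔ (k : Int) ∣ x := by
  rw [← Int.natCast_dvd_natCast, Int.dvd_natAbs]

theorem gcd_sub_of_dvd (d : Nat) (x p : Int) (hd : (d : Int) ∣ p) :
    Nat.gcd d (x - p).natAbs = Nat.gcd d x.natAbs := by
  apply Nat.dvd_antisymm
  · apply Nat.dvd_gcd (Nat.gcd_dvd_left _ _)
    rw [natAbs_dvd_iff']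
    have h1 : ((Nat.gcd d (x - p).natAbs : Nat) : Int) ∣ x - p :=
      (natAbs_dvd_iff' _ _).1 (Nat.gcd_dvd_right _ _)
    have h2 : ((Nat.gcd d (x - p).natAbs : Nat) : Int) ∣ p :=
      dvd_trans (Int.natCast_dvd_natCast.2 (Nat.gcd_dvd_left _ _)) hd
    have h3 := dvd_add h1 h2
    simpa using h3
  · apply Nat.dvd_gcd (Nat.gcd_dvd_left _ _)
    rw [natAbs_dvd_iff']
    have h1 : ((Nat.gcd d x.natAbs : Nat) : Int) ∣ x :=
      (natAbs_dvd_iff' _ _).1 (Nat.gcd_dvd_right _ _)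
    have h2 : ((Nat.gcd d x.natAbs : Nat) : Int) ∣ p :=
      dvd_trans (Int.natCast_dvd_natCast.2 (Nat.gcd_dvd_left _ _)) hd
    exact dvd_sub h1 h2

theorem passA_len : ∀ (L : List Int) (p : Int), (passA p L).1.length = L.length := by
  intro L
  induction L with
  | nil => intro p; rfl
  | cons x t ih =>
    intro p
    by_cases h : x > 0 ∧ x > p <;> simp [passA, h, ih]

theorem passA_pos : ∀ (L : List Int) (p : Int), (∀ y ∈ L, (0:Int) < y) →
    ∀ y ∈ (passA p L).1, (0:Int) < y := by
  intro L
  induction L with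
  | nil => intro p _ y hy; simp [passA] at hy
  | cons x t ih =>
    intro p hpos y hy
    by_cases h : x > 0 ∧ x > p
    · simp only [passA, if_pos h] at hy
      rcases List.mem_cons.1 hy with rfl | hy
      · omega
      · exact ih _ (fun z hz => hpos z (List.mem_cons_of_mem _ hz)) y hy
    · simp only [passA, if_neg h] at hy
      rcases List.mem_cons.1 hy with rfl | hy
      · exact hpos y (List.mem_cons_self)
      · exact ih _ (fun z hz => hpos z (List.mem_cons_of_mem _ hz)) y hy

theorem passA_gcd : ∀ (L : List Int) (p : Int) (g : Nat),
    foldG (Nat.gcd g p.natAbs) (passA p L).1 = foldG (Nat.gcd g p.natAbs) L := by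
  intro L
  induction L with
  | nil => intro p g; rfl
  | cons x t ih =>
    intro p g
    by_cases h : x > 0 ∧ x > p
    · simp only [passA, if_pos h, foldG, List.foldl]
      have hdvd : ((Nat.gcd g p.natAbs : Nat) : Int) ∣ p :=
        dvd_trans (Int.natCast_dvd_natCast.2 (Nat.gcd_dvd_right g p.natAbs)) (Int.natAbs_dvd.2 dvd_rfl)
      have hsub : Nat.gcd (Nat.gcd g p.natAbs) (x - p).natAbs
          = Nat.gcd (Nat.gcd g p.natAbs) x.natAbs := gcd_sub_of_dvd _ x p hdvd
      have := ih (x - p) (Nat.gcd g p.natAbs)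
      simp only [foldG] at this
      rw [this, hsub]
    · simp only [passA, if_neg h, foldG, List.foldl]
      have := ih x (Nat.gcd g p.natAbs)
      simp only [foldG] at this
      rw [this]

theorem passA_sum : ∀ (L : List Int) (p : Int), 0 < p → (∀ y ∈ L, (0:Int) < y) →
    (passA p L).1.sum ≤ L.sum ∧ ((passA p L).2 = true → (passA p L).1.sum < L.sum) := by
  intro L
  induction L with
  | nil => intro p _ _; simp [passA]
  | cons x t ih =>
    intro p hp hpos
    have hx : 0 < x := hpos x List.mem_cons_self
    have ht : ∀ y ∈ t, (0:Int) < y := fun z hz => hpos z (List.mem_cons_of_mem _ hz)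
    by_cases h : x > 0 ∧ x > p
    · have hih := ih (x - p) (by omega) ht
      simp only [passA, if_pos h, List.sum_cons]
      constructor
      · omega
      · intro _; omega
    · have hih := ih x hx ht
      simp only [passA, if_neg h, List.sum_cons]
      constructor
      · omega
      · intro hf; have := hih.2 hf; omega

theorem passA_false_eq : ∀ (L : List Int) (p : Int),
    (passA p L).2 = false → (passA p L).1 = L := by
  intro L
  induction L with
  | nil => intro p _; rfl
  | cons x t ih =>
    intro p hf
    by_cases h : x > 0 ∧ x > p
    · simp [passA, h] at hf
    · simp only [passA, if_neg h] at hf ⊢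
      rw [ih x hf]

theorem passA_false_le : ∀ (L : List Int) (p : Int), (∀ y ∈ L, (0:Int) < y) →
    (passA p L).2 = false → ∀ y ∈ L, y ≤ p := by
  intro L
  induction L with
  | nil => intro p _ _ y hy; simp at hy
  | cons x t ih =>
    intro p hpos hf y hy
    have hx : 0 < x := hpos x List.mem_cons_self
    by_cases h : x > 0 ∧ x > p
    · simp [passA, h] at hf
    · have hxp : x ≤ p := by omega
      simp only [passA, if_neg h] at hf
      rcases List.mem_cons.1 hy with rfl | hy
      · exact hxp
      · exact le_trans (ih x (fun z hz => hpos z (List.mem_cons_of_mem _ hz)) hf y hy) hxp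

theorem passA_nonpos : ∀ (L : List Int) (p : Int), (∀ y ∈ L, y ≤ (0:Int)) →
    passA p L = (L, false) := by
  intro L
  induction L with
  | nil => intro p _; rfl
  | cons x t ih =>
    intro p hnp
    have hx : x ≤ 0 := hnp x List.mem_cons_self
    have h : ¬ (x > 0 ∧ x > p) := by omega
    simp only [passA, if_neg h, ih x (fun z hz => hnp z (List.mem_cons_of_mem _ hz))]

theorem sum_const_list : ∀ (L : List Int) (x : Int), (∀ y ∈ L, y = x) →
    L.sum = (L.length : Int) * x := by
  intro L
  induction L with
  | nil => intro x _; simp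
  | cons a t ih =>
    intro x h
    have ha : a = x := h a List.mem_cons_self
    have := ih x (fun z hz => h z (List.mem_cons_of_mem _ hz))
    simp only [List.sum_cons, List.length_cons, this, ha]
    push_cast; ring

theorem foldG_const : ∀ (L : List Int) (x : Int), (∀ y ∈ L, y = x) →
    foldG x.natAbs L = x.natAbs := by
  intro L
  induction L with
  | nil => intro x _; rfl
  | cons a t ih =>
    intro x h
    have ha : a = x := h a List.mem_cons_self
    simp only [foldG, List.foldl, ha, Nat.gcd_self]
    exact ih x (fun z hz => h z (List.mem_cons_of_mem _ hz))

theorem foldG_perm : ∀ {L1 L2 : List Int}, L1.Perm L2 → ∀ a, foldG a L1 = foldG a L2 := by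
  intro L1 L2 h
  induction h with
  | nil => intro a; rfl
  | cons x _ ih => intro a; simp only [foldG, List.foldl]; exact ih _
  | swap x y L =>
    intro a
    simp only [foldG, List.foldl]
    have : Nat.gcd (Nat.gcd a y.natAbs) x.natAbs = Nat.gcd (Nat.gcd a x.natAbs) y.natAbs := by
      rw [Nat.gcd_assoc, Nat.gcd_assoc, Nat.gcd_comm y.natAbs x.natAbs]
    rw [this]
  | trans _ _ ih1 ih2 => intro a; rw [ih1, ih2]

theorem sum_nonneg_of_pos : ∀ (L : List Int), (∀ y ∈ L, (0:Int) < y) → 0 ≤ L.sum := by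
  intro L
  induction L with
  | nil => intro _; simp
  | cons x t ih =>
    intro h
    have hx := h x List.mem_cons_self
    have := ih (fun z hz => h z (List.mem_cons_of_mem _ hz))
    simp only [List.sum_cons]; omega

theorem euclid_eq_gcd (g x : Int) (hg : 0 ≤ g) (hx : 0 ≤ x) :
    euclid g x = ((Nat.gcd g.natAbs x.natAbs : Nat) : Int) := by
  by_cases h : 0 < x
  · rw [euclid, dif_pos h]
    have h0 : 0 ≤ PySem.Int.mod g x := PySem.Int.mod_nonneg g h
    have hrec := euclid_eq_gcd x (PySem.Int.mod g x) (le_of_lt h) h0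
    rw [hrec, PySem.Int.mod_eq_emod_of_pos h]
    have hge : ((g % x).gcd x : Nat) = g.gcd x := Int.gcd_emod g x
    have : Nat.gcd x.natAbs (g % x).natAbs = Nat.gcd g.natAbs x.natAbs := by
      rw [Nat.gcd_comm]
      exact hge
    rw [this]
  · rw [euclid, dif_neg h]
    have hx0 : x = 0 := by omega
    subst hx0
    simp [Int.natAbs_of_nonneg hg]
termination_by x.toNat
decreasing_by
  have h2 := PySem.Int.mod_lt g h
  omega

theorem foldl_euclid : ∀ (L : List Int) (a : Int), 0 ≤ a → (∀ y ∈ L, (0:Int) ≤ y) →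
    L.foldl euclid a = ((foldG a.natAbs L : Nat) : Int) := by
  intro L
  induction L with
  | nil => intro a ha _; simp [foldG, Int.natAbs_of_nonneg ha]
  | cons x t ih =>
    intro a ha hall
    have hx : (0:Int) ≤ x := hall x List.mem_cons_self
    simp only [List.foldl, foldG]
    rw [euclid_eq_gcd a x ha hx]
    rw [ih _ (Int.natCast_nonneg _) (fun z hz => hall z (List.mem_cons_of_mem _ hz))]
    simp [foldG]

theorem onePass_nonpos (L : List Int) (h : ∀ y ∈ L, y ≤ (0:Int)) : onePass L = (L, false) := by
  cases L with
  | nil => rfl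
  | cons x t =>
    simp only [onePass, passA_nonpos t x (fun z hz => h z (List.mem_cons_of_mem _ hz))]

theorem loopA_eq : ∀ (fuel : Nat) (X : List Int), (∀ y ∈ X, (0:Int) < y) →
    X.sum.toNat < fuel → loopA fuel X = (X.length : Int) * ((foldG 0 X : Nat) : Int) := by
  intro fuel
  induction fuel with
  | zero => intro X _ h; exact absurd h (Nat.not_lt_zero _)
  | succ n ih =>
    intro X hpos hfuel
    have hperm : (PySem.List.sorted X (fun x => x) false).Perm X := PySem.List.sorted_perm X (fun x => x) false
    have hsum : (PySem.List.sorted X (fun x => x) false).sum = X.sum := hperm.sum_eq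
    have hlen : (PySem.List.sorted X (fun x => x) false).length = X.length := hperm.length_eq
    have hfold : foldG 0 (PySem.List.sorted X (fun x => x) false) = foldG 0 X := foldG_perm hperm 0
    have hposS : ∀ y ∈ PySem.List.sorted X (fun x => x) false, (0:Int) < y :=
      fun y hy => hpos y (hperm.mem_iff.1 hy)
    simp only [loopA]
    cases hXsc : PySem.List.sorted X (fun x => x) false with
    | nil =>
      have hXnil : X = [] := by
        have := hperm.length_eq
        rw [hXsc] at this
        exact List.eq_nil_of_length_eq_zero this.symm
      subst hXnil
      simp [onePass]
    | cons x rest =>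
      rw [hXsc] at hposS hsum hlen hfold
      have hx : 0 < x := hposS x List.mem_cons_self
      have hrest : ∀ y ∈ rest, (0:Int) < y := fun z hz => hposS z (List.mem_cons_of_mem _ hz)
      by_cases hf : (passA x rest).2 = true
      · simp only [onePass, hf, if_pos]
        have hpos' : ∀ y ∈ x :: (passA x rest).1, (0:Int) < y := by
          intro y hy
          rcases List.mem_cons.1 hy with rfl | hy
          · exact hx
          · exact passA_pos rest x hrest y hy
        have hdec : (x :: (passA x rest).1).sum < X.sum := by
          have := (passA_sum rest x hx hrest).2 hf
          simp only [List.sum_cons] at *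
          omega
        have hnn : 0 ≤ (x :: (passA x rest).1).sum := sum_nonneg_of_pos _ hpos'
        have hbound : (x :: (passA x rest).1).sum.toNat < n := by omega
        rw [ih _ hpos' hbound]
        have hlen' : ((x :: (passA x rest).1).length : Int) = (X.length : Int) := by
          simp only [List.length_cons, passA_len]
          rw [← hlen]; simp
        have hfold' : foldG 0 (x :: (passA x rest).1) = foldG 0 X := by
          rw [← hfold]
          simp only [foldG, List.foldl]
          have := passA_gcd rest x 0
          simp only [foldG] at this
          exact this
        rw [hlen', hfold']
      · have hf' : (passA x rest).2 = false := by
          cases hb : (passA x rest).2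
          · rfl
          · exact absurd hb hf
        simp only [onePass, hf', Bool.false_eq_true, if_neg, not_false_eq_true]
        rw [passA_false_eq rest x hf']
        have hle : ∀ y ∈ rest, y ≤ x := passA_false_le rest x hrest hf'
        have hge : ∀ y ∈ rest, x ≤ y := by
          have hpw := PySem.List.sorted_pairwise (xs := X) (key := fun x => x)
          rw [hXsc] at hpw
          exact (List.pairwise_cons.1 hpw).1
        have hconst : ∀ y ∈ (x :: rest), y = x := by
          intro y hy
          rcases List.mem_cons.1 hy with rfl | hy
          · rfl
          · exact le_antisymm (hle y hy) (hge y hy)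
        rw [sum_const_list (x :: rest) x hconst]
        have hg : foldG 0 (x :: rest) = x.natAbs := by
          simp only [foldG, List.foldl, Nat.gcd_zero_left]
          have := foldG_const rest x (fun z hz => hconst z (List.mem_cons_of_mem _ hz))
          simpa [foldG] using this
        rw [← hfold, hg, ← hlen]
        rw [Int.natAbs_of_nonneg (le_of_lt hx)]

-- ===== VERDICT (by name: the statement is the Claim_ definition above) =====
theorem smallest_possible_sum_spec : Claim_equal_smallest_possible_sum := by
  intro X _ hpre0
  have hpre : (∀ y ∈ X, (0:Int) < y) ∨ (∀ y ∈ X, y ≤ (0:Int)) := by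
    rcases hpre0 with h | h
    · left; intro y hy; simpa using (List.all_eq_true.1 h) y hy
    · right; intro y hy; simpa using (List.all_eq_true.1 h) y hy
  unfold Spec_smallest_possible_sum
  by_cases hall : ∀ y ∈ X, (0:Int) < y
  · have hB : X.all (fun x => decide (x > 0)) = true := by
      rw [List.all_eq_true]
      intro y hy
      simpa using hall y hy
    unfold smallest_possible_sum smallest_possible_sum_alt
    rw [if_neg (by simp [hB])]
    rw [loopA_eq (X.sum.toNat + 1) X hall (Nat.lt_succ_self _)]
    rw [foldl_euclid X 0 le_rfl (fun y hy => le_of_lt (hall y hy))]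
    simp [foldG]
  · have hneg : ∀ y ∈ X, y ≤ (0:Int) := by
      rcases hpre with h | h
      · exact absurd h hall
      · exact h
    have hB : X.all (fun x => decide (x > 0)) = false := by
      push Not at hall
      obtain ⟨y, hy, hy0⟩ := hall
      rw [List.all_eq_false]
      exact ⟨y, hy, by simpa using hy0⟩
    unfold smallest_possible_sum smallest_possible_sum_alt
    rw [if_pos (by simp [hB])]
    have hperm : (PySem.List.sorted X (fun x => x) false).Perm X := PySem.List.sorted_perm X (fun x => x) false
    have hnegS : ∀ y ∈ PySem.List.sorted X (fun x => x) false, y ≤ (0:Int) :=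
      fun y hy => hneg y (hperm.mem_iff.1 hy)
    simp only [loopA, onePass_nonpos _ hnegS]
    simp [hperm.sum_eq]
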